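-- pv_equiv track=rewrite | github.com/Ahm3dAlAli/SingHacks2025JB | backend/services/document-corroboration-engine/app/agents/format_validator.py | _check_heading_consistency
-- ===== SOURCE A (Python) =====
-- from typing import Dict, Any, List, Tuple
--
-- def _check_heading_consistency(structure: Dict[str, Any]) -> List[str]:
--     """Check heading consistency"""
--     issues = []
--
--     sections = structure.get('sections', [])
--     heading_levels = [section.get('level', 1) for section in sections]
--
--     # Check for heading level skipping
--     if heading_levels:
--         max_level = max(heading_levels)
--         for level in range(1, max_level + 1):
--             if level not in heading_levels and level < max_level:
--                 issues.append(f"heading_level_{level}_skipped")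
--
--     return issues
-- ===== SOURCE B (Python) =====
-- def _check_heading_consistency(structure):
--     """Check heading consistency (gap-walk over the sorted set of present levels)"""
--     sections = structure.get('sections', [])
--     levels = sorted({section.get('level', 1) for section in sections})
--     issues = []
--     prev = 0
--     for lvl in levels:
--         for m in range(max(prev, 0) + 1, lvl):
--             issues.append(f"heading_level_{m}_skipped")
--         prev = lvl
--     return issues
-- ===== Notes on version B (the rewrite author's own statement) =====
-- stated objective: alternative
-- what changed: A scans range(1, max+1) and tests each candidate level for membership in the full level list; B walks once over sorted(set(levels)) with a prev cursor and emits the gap between consecutive present levels, so no per-level membership test remains.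
import Mathlib
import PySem

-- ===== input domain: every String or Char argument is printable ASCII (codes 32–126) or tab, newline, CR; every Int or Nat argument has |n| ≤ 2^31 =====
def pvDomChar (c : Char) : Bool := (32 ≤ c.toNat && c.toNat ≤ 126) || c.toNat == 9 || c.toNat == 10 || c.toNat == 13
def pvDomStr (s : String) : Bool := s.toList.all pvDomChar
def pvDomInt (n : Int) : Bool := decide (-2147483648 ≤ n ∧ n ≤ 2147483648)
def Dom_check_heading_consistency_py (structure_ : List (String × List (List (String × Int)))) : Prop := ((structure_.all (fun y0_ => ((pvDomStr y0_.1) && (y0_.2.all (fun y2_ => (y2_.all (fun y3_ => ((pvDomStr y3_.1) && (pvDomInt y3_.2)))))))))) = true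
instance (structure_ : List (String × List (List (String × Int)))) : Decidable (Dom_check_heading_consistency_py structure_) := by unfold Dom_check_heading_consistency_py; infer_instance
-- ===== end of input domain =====

-- B replaces A's per-level membership scan over range(1, max+1) by a single gap-walk over
-- sorted(set(levels)); same return value, different decomposition (objective: alternative).

-- ===== PORT A =====
def check_heading_consistency_py (structure_ : List (String × List (List (String × Int)))) : List String :=
  let sections := (PySem.Dict.mk structure_).getD "sections" []
  let heading_levels := sections.map (fun sec => (PySem.Dict.mk sec).getD "level" 1)
  if heading_levels.isEmpty then [] else
    match PySem.List.max? heading_levels (fun x => x) with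
    | none => []  -- unreachable: heading_levels nonempty
    | some max_level =>
      (PySem.List.pyRange 1 (max_level + 1) 1).foldl
        (fun issues level =>
          if level ∉ heading_levels ∧ level < max_level then
            issues ++ ["heading_level_" ++ PySem.Int.toStr level ++ "_skipped"]
          else issues) []

-- ===== PORT B =====
def check_heading_consistency_py_alt (structure_ : List (String × List (List (String × Int)))) : List String :=
  let sections := (PySem.Dict.mk structure_).getD "sections" []
  let levels := PySem.List.sorted (PySem.Set.ofList (sections.map (fun sec => (PySem.Dict.mk sec).getD "level" 1))) (fun x => x) false
  (levels.foldl
    (fun (st : List String × Int) lvl =>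
      (st.1 ++ (PySem.List.pyRange (max st.2 0 + 1) lvl 1).map
        (fun m => "heading_level_" ++ PySem.Int.toStr m ++ "_skipped"), lvl))
    ([], 0)).1

-- ===== PRECONDITION & SPEC =====
def Spec_check_heading_consistency_py (structure_ : List (String × List (List (String × Int)))) (out : List String) : Prop := out = check_heading_consistency_py_alt structure_
instance (structure_ : List (String × List (List (String × Int)))) (out : List String) : Decidable (Spec_check_heading_consistency_py structure_ out) := by unfold Spec_check_heading_consistency_py; infer_instance

-- ===== CLAIM (what is proved, stated in full; the proofs are below) =====
def Claim_equal_check_heading_consistency_py : Prop := ∀ (structure_ : List (String × List (List (String × Int)))), Dom_check_heading_consistency_py structure_ → Spec_check_heading_consistency_py structure_ (check_heading_consistency_py structure_)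

-- ===== LEMMAS AND PROOFS =====

-- the list of missing levels B's gap-walk emits, as a pure function of (prev, sorted set)
def pvGaps (prev : Int) (S : List Int) : List Int :=
  match S with
  | [] => []
  | l :: rest => PySem.List.pyRange (max prev 0 + 1) l 1 ++ pvGaps l rest

theorem pvB_foldl (f : Int → String) (S : List Int) (acc : List String) (prev : Int) :
    (S.foldl (fun (st : List String × Int) lvl =>
      (st.1 ++ (PySem.List.pyRange (max st.2 0 + 1) lvl 1).map f, lvl)) (acc, prev)).1
    = acc ++ (pvGaps prev S).map f := by
  induction S generalizing acc prev with
  | nil => simp [pvGaps]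
  | cons l rest ih => simp [pvGaps, List.foldl_cons, ih]

theorem pvGetLastD_mem (S : List Int) (d : Int) (h : S ≠ []) : S.getLastD d ∈ S := by
  induction S generalizing d with
  | nil => exact absurd rfl h
  | cons a t ih =>
    cases t with
    | nil => simp
    | cons r u =>
      rw [List.getLastD_cons]
      exact List.mem_cons_of_mem a (ih a (by simp))

theorem pvLast_ge (S : List Int) (d : Int) (hs : S.Pairwise (· < ·)) :
    ∀ x ∈ S, x ≤ S.getLastD d := by
  induction S generalizing d with
  | nil => simp
  | cons l rest ih =>
    rcases List.pairwise_cons.mp hs with ⟨hl, hrest⟩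
    intro x hx
    rw [List.getLastD_cons]
    rcases List.mem_cons.mp hx with rfl | hx
    · rcases eq_or_ne rest [] with rfl | hne
      · simp
      · exact le_of_lt (hl _ (pvGetLastD_mem rest x hne))
    · exact ih l hrest x hx

theorem pvGaps_spec (S : List Int) (hs : S.Pairwise (· < ·)) :
    ∀ prev, (prev ≤ 0 ∨ ∀ x ∈ S, prev < x) →
    pvGaps prev S
      = (PySem.List.pyRange (max prev 0 + 1) (S.getLastD prev) 1).filter
          (fun m => decide (m ∉ S)) := by
  induction S with
  | nil =>
    intro prev _
    simp [pvGaps, PySem.List.pyRange_one_eq_nil (by omega : (prev : Int) ≤ max prev 0 + 1)]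
  | cons l rest ih =>
    intro prev hprev
    rcases List.pairwise_cons.mp hs with ⟨hl, hrest⟩
    have ihr := ih hrest l (Or.inr hl)
    have hE : l ≤ rest.getLastD l := by
      rcases eq_or_ne rest [] with rfl | hne
      · simp
      · exact le_of_lt (hl _ (pvGetLastD_mem rest l hne))
    rw [List.getLastD_cons]
    by_cases hcase : max prev 0 + 1 ≤ l
    · -- the head level lies at or above the walk start
      have hmaxl : max l 0 = l := by omega
      have hsplit := PySem.List.pyRange_one_append (max prev 0 + 1) l (rest.getLastD l) hcase hE
      have hkeep : (PySem.List.pyRange (max prev 0 + 1) l 1).filter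
          (fun m => decide (m ∉ l :: rest)) = PySem.List.pyRange (max prev 0 + 1) l 1 := by
        apply List.filter_eq_self.mpr
        intro m hm
        have hm' := (PySem.List.mem_pyRange_one).mp hm
        simp only [decide_eq_true_eq, List.mem_cons, not_or]
        exact ⟨by omega, fun hmr => absurd (hl m hmr) (by omega)⟩
      rcases eq_or_ne rest [] with rfl | hne
      · simp only [List.getLastD] at ⊢
        simp only [pvGaps, List.append_nil]
        exact hkeep.symm
      · have hlt : l < rest.getLastD l := hl _ (pvGetLastD_mem rest l hne)
        have hcons := PySem.List.pyRange_one_cons hlt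
        rw [hsplit, List.filter_append, hkeep, hcons, List.filter_cons]
        have hlnot : (decide (l ∉ l :: rest)) = false := by simp
        rw [hlnot]
        have hcongr : (PySem.List.pyRange (l + 1) (rest.getLastD l) 1).filter
            (fun m => decide (m ∉ l :: rest))
            = (PySem.List.pyRange (l + 1) (rest.getLastD l) 1).filter
            (fun m => decide (m ∉ rest)) := by
          apply List.filter_congr
          intro m hm
          have hm' := (PySem.List.mem_pyRange_one).mp hm
          rw [decide_eq_decide]
          simp only [List.mem_cons, not_or]
          constructor
          · rintro ⟨-, h⟩; exact h
          · intro h; exact ⟨by omega, h⟩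
        simp only [Bool.false_eq_true, if_false]
        rw [hcongr]
        rw [hmaxl] at ihr
        simp only [pvGaps]
        rw [ihr]
    · -- head level below the walk start: it contributes nothing (l ≤ 0 here)
      have hpl : prev < l ∨ prev ≤ 0 := by
        rcases hprev with h0 | hall
        · exact Or.inr h0
        · exact Or.inl (hall l (by simp))
      have hl0 : l ≤ 0 := by omega
      have hmax0 : max prev 0 = 0 := by omega
      have hmaxl : max l 0 = 0 := by omega
      have hnil : PySem.List.pyRange (max prev 0 + 1) l 1 = [] :=
        PySem.List.pyRange_one_eq_nil (by omega)
      simp only [pvGaps, hnil, List.nil_append]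
      rw [ihr, hmaxl, hmax0]
      apply List.filter_congr
      intro m hm
      have hm' := (PySem.List.mem_pyRange_one).mp hm
      rw [decide_eq_decide]
      simp only [List.mem_cons, not_or]
      constructor
      · intro h; exact ⟨by omega, h⟩
      · rintro ⟨-, h⟩; exact h

theorem pvCore (hl : List Int) :
    (if hl.isEmpty then [] else
      match PySem.List.max? hl (fun x => x) with
      | none => []
      | some max_level =>
        (PySem.List.pyRange 1 (max_level + 1) 1).foldl
          (fun issues level =>
            if level ∉ hl ∧ level < max_level then
              issues ++ ["heading_level_" ++ PySem.Int.toStr level ++ "_skipped"]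
            else issues) [])
    = ((PySem.List.sorted (PySem.Set.ofList hl) (fun x => x) false).foldl
        (fun (st : List String × Int) lvl =>
          (st.1 ++ (PySem.List.pyRange (max st.2 0 + 1) lvl 1).map
            (fun m => "heading_level_" ++ PySem.Int.toStr m ++ "_skipped"), lvl))
        (([] : List String), (0 : Int))).1 := by
  rcases eq_or_ne hl [] with rfl | hne
  · rfl
  · have hEmpty : hl.isEmpty = false := by simp [hne]
    obtain ⟨M, hM⟩ : ∃ M, PySem.List.max? hl (fun x => x) = some M := by
      cases hl with
      | nil => exact absurd rfl hne
      | cons a t => exact ⟨List.foldl max a t, PySem.List.max?_id_cons a t⟩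
    set S := PySem.List.sorted (PySem.Set.ofList hl) (fun x => x) false with hS
    have hp : S.Pairwise (· < ·) := by
      rw [hS]; exact PySem.List.sorted_ofList_pairwise_lt hl
    have hmem : ∀ m : Int, m ∈ S ↔ m ∈ hl := by
      intro m
      rw [hS, PySem.List.mem_sorted, PySem.Set.mem_ofList]
    have hSne : S ≠ [] := by
      intro h
      rcases List.exists_mem_of_ne_nil hl hne with ⟨x, hx⟩
      exact absurd ((hmem x).mpr hx) (by simp [h])
    have hMmem : M ∈ hl := PySem.List.max?_mem hM
    have hMmax : ∀ y ∈ hl, y ≤ M := by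
      intro y hy
      exact PySem.List.max?_isMax hM y hy
    have hlast : S.getLastD 0 = M := by
      have h1 : S.getLastD 0 ∈ S := pvGetLastD_mem S 0 hSne
      have h2 : S.getLastD 0 ≤ M := hMmax _ ((hmem _).mp h1)
      have h3 : M ≤ S.getLastD 0 := pvLast_ge S 0 hp M ((hmem M).mpr hMmem)
      omega
    rw [hM, if_neg (by simp [hEmpty])]
    simp only []
    rw [PySem.List.foldl_append_ite (fun level => level ∉ hl ∧ level < M)
      (fun level => "heading_level_" ++ PySem.Int.toStr level ++ "_skipped")]
    rw [pvB_foldl, pvGaps_spec S hp 0 (Or.inl le_rfl), hlast]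
    simp only [List.nil_append]
    congr 1
    by_cases hM1 : 1 ≤ M
    · rw [PySem.List.pyRange_one_succ_right hM1, List.filter_append]
      have hMdrop : (List.filter (fun x => decide (x ∉ hl ∧ x < M)) [M]) = [] := by
        simp
      rw [hMdrop, List.append_nil]
      have : max 0 0 + 1 = (1 : Int) := by omega
      rw [this]
      apply List.filter_congr
      intro m hm
      have hm' := (PySem.List.mem_pyRange_one).mp hm
      rw [decide_eq_decide]
      constructor
      · rintro ⟨h, -⟩; exact fun hS' => h ((hmem m).mp hS')
      · intro h; exact ⟨fun hhl => h ((hmem m).mpr hhl), by omega⟩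
    · have h1 : PySem.List.pyRange 1 (M + 1) 1 = [] :=
        PySem.List.pyRange_one_eq_nil (by omega)
      have h2 : PySem.List.pyRange (max 0 0 + 1) M 1 = [] :=
        PySem.List.pyRange_one_eq_nil (by omega)
      rw [h1, h2]
      simp

-- ===== VERDICT (by name: the statement is the Claim_ definition above) =====
theorem check_heading_consistency_py_spec : Claim_equal_check_heading_consistency_py := by
  intro structure_ _
  unfold Spec_check_heading_consistency_py check_heading_consistency_py check_heading_consistency_py_alt
  exact pvCore _
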